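-- pv_equiv track=rewrite | github.com/Apress/good-habits-for-great-coding | stuebenSourceCodeChapter8.py | DFS_FewestNodesPath
-- ===== SOURCE A (Python) =====
-- graph =  {'A':[('Z',  75), ('T', 118), ('S', 140)],
--           'Z':[('A',  75), ('O',  71)],
--           'T':[('A', 118), ('L', 111)],
--           'L':[('T', 111), ('M',  70)],
--           'M':[('L',  70), ('D',  75)],
--           'D':[('M',  75), ('C',  120)],
--           'C':[('D', 120), ('R',  146), ('P',  138)],
--           'R':[('C', 146), ('P',   97), ('S',   80)],
--           'S':[('R',  80), ('F',   99), ('O',  151), ('A', 140)],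
--           'O':[('S', 151), ('Z',   71)],
--           'P':[('C', 138), ('R',   97), ('B',  101)],
--           'F':[('S',  99), ('B',  211)],
--           'B':[('P', 101), ('F',  211), ('G',   90), ('U',  85)],
--           'G':[('B',  90)],
--           'U':[('B',  85), ('H',   98), ('V',  142)],
--           'H':[('U',  98), ('E',  86)],
--           'E':[('H',  86)],
--           'V':[('U', 142), ('I',   92)],
--           'I':[('V',  92), ('N',   87)],
--           'N':[('I',  87)],}
--
-- def DFS_FewestNodesPath(node, goalNode, path=[]):
-- # Notes: 1. We avoid loops by reference to the path itself.
-- #        2. The recursion will be unwound just below the recursive call at (*).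
--
-- #---Append current node.
--     path = path + [node]
--
-- #---base case
--     if node == goalNode:
--        return path
--
-- #---recursive case
--     bestPathSoFar = []
--     for (child, dist) in graph[node]: # dist is a dummy variable that is never used.
--         if child not in path:
--            newPath = DFS_FewestNodesPath(child, goalNode, path)               # <-- (*)
--            if newPath and (len(newPath) < len(bestPathSoFar) or bestPathSoFar == []):
--               bestPathSoFar = newPath
--
-- #---Return best path, which could be [].
--     return bestPathSoFar
-- ===== SOURCE B (Python) =====
-- # BFS over simple paths; adjacency is a plain name-only successor function
-- # (distances are irrelevant to the fewest-nodes objective).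
-- def _children(n):
--     return {'A': ['Z', 'T', 'S'], 'Z': ['A', 'O'], 'T': ['A', 'L'],
--             'L': ['T', 'M'], 'M': ['L', 'D'], 'D': ['M', 'C'],
--             'C': ['D', 'R', 'P'], 'R': ['C', 'P', 'S'],
--             'S': ['R', 'F', 'O', 'A'], 'O': ['S', 'Z'],
--             'P': ['C', 'R', 'B'], 'F': ['S', 'B'],
--             'B': ['P', 'F', 'G', 'U'], 'G': ['B'],
--             'U': ['B', 'H', 'V'], 'H': ['U', 'E'], 'E': ['H'],
--             'V': ['U', 'I'], 'I': ['V', 'N'], 'N': ['I']}[n]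
--
-- def DFS_FewestNodesPath(node, goalNode, path=[]):
--     # Level-synchronized breadth-first search over simple paths: the frontier
--     # holds, left to right, every simple path one level deeper than the
--     # previous frontier; the first goal-ending path is the shortest, with
--     # ties broken exactly as the exhaustive search breaks them.
--     frontier = [path + [node]]
--     while frontier:
--         for p in frontier:
--             if p[-1] == goalNode:
--                 return p
--         frontier = [p + [c]
--                     for p in frontier
--                     for c in _children(p[-1])
--                     if c not in p]
--     return []
-- ===== Notes on version B (the rewrite author's own statement) =====
-- stated objective: alternative
-- what changed: The exhaustive recursive DFS that enumerates every simple path and keeps the shortest is replaced by an iterative level-synchronized BFS over simple paths (name-only successor function, distances dropped) that stops at the first level containing the goal; first discovery in left-to-right level order reproduces A's minimal-length, DFS-preorder tie-breaking exactly.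
import Mathlib
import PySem

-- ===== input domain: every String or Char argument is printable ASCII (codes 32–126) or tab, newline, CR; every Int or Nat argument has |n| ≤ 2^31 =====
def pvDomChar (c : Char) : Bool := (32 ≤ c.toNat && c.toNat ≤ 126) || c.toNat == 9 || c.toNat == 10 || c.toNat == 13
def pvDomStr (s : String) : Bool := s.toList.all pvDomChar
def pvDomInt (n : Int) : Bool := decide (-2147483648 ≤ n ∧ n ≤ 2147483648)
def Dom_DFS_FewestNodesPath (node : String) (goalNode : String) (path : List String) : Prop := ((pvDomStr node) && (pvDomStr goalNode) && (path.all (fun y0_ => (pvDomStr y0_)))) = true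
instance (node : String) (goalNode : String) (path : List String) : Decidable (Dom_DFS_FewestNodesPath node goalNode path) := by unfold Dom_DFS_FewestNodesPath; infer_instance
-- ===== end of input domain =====

-- B replaces the exhaustive recursive DFS over all simple paths by a level-synchronized BFS
-- over simple paths (name-only successor function, no distances) returning the first goal-reaching
-- path; equal return values, B does not mutate its arguments.


-- ===== PORT A =====

def graphA : PySem.Dict String (List (String × Int)) := PySem.Dict.mk
  [("A", [("Z", 75), ("T", 118), ("S", 140)]),
   ("Z", [("A", 75), ("O", 71)]),
   ("T", [("A", 118), ("L", 111)]),
   ("L", [("T", 111), ("M", 70)]),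
   ("M", [("L", 70), ("D", 75)]),
   ("D", [("M", 75), ("C", 120)]),
   ("C", [("D", 120), ("R", 146), ("P", 138)]),
   ("R", [("C", 146), ("P", 97), ("S", 80)]),
   ("S", [("R", 80), ("F", 99), ("O", 151), ("A", 140)]),
   ("O", [("S", 151), ("Z", 71)]),
   ("P", [("C", 138), ("R", 97), ("B", 101)]),
   ("F", [("S", 99), ("B", 211)]),
   ("B", [("P", 101), ("F", 211), ("G", 90), ("U", 85)]),
   ("G", [("B", 90)]),
   ("U", [("B", 85), ("H", 98), ("V", 142)]),
   ("H", [("U", 98), ("E", 86)]),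
   ("E", [("H", 86)]),
   ("V", [("U", 142), ("I", 92)]),
   ("I", [("V", 92), ("N", 87)]),
   ("N", [("I", 87)])]

def allNodesA : List String :=
  ["A","Z","T","L","M","D","C","R","S","O","P","F","B","G","U","H","E","V","I","N"]

def muA (q : List String) : Nat := (allNodesA.filter (fun x => decide (x ∉ q))).length

theorem graphA_vals : ∀ pr ∈ graphA.items, ∀ cd ∈ pr.2, cd.1 ∈ allNodesA := by decide

theorem graphA_children (k : String) (l : List (String × Int))
    (h : PySem.Dict.get? graphA k = some l) : ∀ cd ∈ l, cd.1 ∈ allNodesA :=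
  graphA_vals (k, l) (PySem.Dict.mem_items_of_get?_eq_some graphA h)

theorem countP_lt {α : Type} (l : List α) (p q : α → Bool)
    (hmono : ∀ a ∈ l, p a = true → q a = true) (c : α) (hc : c ∈ l)
    (hpc : p c = false) (hqc : q c = true) : l.countP p < l.countP q := by
  induction l with
  | nil => cases hc
  | cons a t ih =>
    have hmt : ∀ a ∈ t, p a = true → q a = true := fun x hx => hmono x (List.mem_cons_of_mem _ hx)
    rcases List.mem_cons.mp hc with rfl | hc'
    · have := List.countP_mono_left hmt
      simp [hpc, hqc]
      omega
    · have := ih hmt hc'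
      have ha := hmono a (List.mem_cons_self)
      simp [List.countP_cons]
      by_cases hpa : p a = true
      · simp [hpa, ha hpa]; omega
      · simp at hpa; simp [hpa]; split <;> omega

theorem muA_lt (q : List String) (c : String) (hc : c ∈ allNodesA) (hq : c ∉ q) :
    muA (q ++ [c]) < muA q := by
  unfold muA
  rw [← List.countP_eq_length_filter, ← List.countP_eq_length_filter]
  refine countP_lt _ _ _ ?_ c hc (by simp) (by simp [hq])
  intro a _ ha
  simp only [decide_eq_true_eq, List.mem_append] at *
  tauto

def DFS_FewestNodesPath (node : String) (goalNode : String) (path : List String) : List String :=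
  let p := path ++ [node]
  if node = goalNode then p
  else
    match h : PySem.Dict.get? graphA node with
    | none => []
    | some l =>
      l.attach.foldl
        (fun bestPathSoFar cd =>
          if hc : cd.1.1 ∉ p then
            let newPath := DFS_FewestNodesPath cd.1.1 goalNode p
            if newPath ≠ [] ∧ (newPath.length < bestPathSoFar.length ∨ bestPathSoFar = []) then newPath
            else bestPathSoFar
          else bestPathSoFar)
        []
termination_by muA (path ++ [node])
decreasing_by
  exact muA_lt _ _ (graphA_children _ _ h _ cd.2) hc

-- ===== PORT B =====

-- name-only successor function of B (_children in Source B; default [] is unreachable under Pre_,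
-- where Python raises KeyError)
def childNamesB (n : String) : List String :=
  match n with
  | "A" => ["Z", "T", "S"] | "Z" => ["A", "O"] | "T" => ["A", "L"]
  | "L" => ["T", "M"]      | "M" => ["L", "D"] | "D" => ["M", "C"]
  | "C" => ["D", "R", "P"] | "R" => ["C", "P", "S"]
  | "S" => ["R", "F", "O", "A"] | "O" => ["S", "Z"]
  | "P" => ["C", "R", "B"] | "F" => ["S", "B"]
  | "B" => ["P", "F", "G", "U"] | "G" => ["B"]
  | "U" => ["B", "H", "V"] | "H" => ["U", "E"] | "E" => ["H"]
  | "V" => ["U", "I"]      | "I" => ["V", "N"] | "N" => ["I"]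
  | _ => []

-- one BFS level down: extend every frontier path by each unvisited successor
def nextLevelB (p : List String) : List (List String) :=
  ((childNamesB (p.getLastD "")).filter (fun c => decide (c ∉ p))).map (fun c => p ++ [c])

def vertexPoolB : List String :=
  ["N","I","V","E","H","U","G","B","F","P","O","S","R","C","D","M","L","T","Z","A"]

theorem childNamesB_pool (n : String) : ∀ c ∈ childNamesB n, c ∈ vertexPoolB := by
  unfold childNamesB; split <;> decide

def weightB (p : List String) : Nat :=
  1 + ((nextLevelB p).attach.map (fun q => weightB q.1)).sum
termination_by (vertexPoolB.filter (fun x => decide (x ∉ p))).length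
decreasing_by
  have hm := q.2
  unfold nextLevelB at hm
  rw [List.mem_map] at hm
  obtain ⟨c, hcf, hq⟩ := hm
  rw [← hq]
  rw [List.mem_filter] at hcf
  rw [← List.countP_eq_length_filter, ← List.countP_eq_length_filter]
  refine countP_lt _ _ _ ?_ c (childNamesB_pool _ _ hcf.1) (by simp) hcf.2
  intro a _ ha
  simp only [decide_eq_true_eq, List.mem_append] at *
  tauto

theorem weightB_succ (p : List String) : weightB p = 1 + ((nextLevelB p).map weightB).sum := by
  rw [weightB]
  simp

theorem weight_next_le (F : List (List String)) :
    ((F.flatMap nextLevelB).map weightB).sum ≤ (F.map weightB).sum := by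
  induction F with
  | nil => simp
  | cons p F ih =>
    have := weightB_succ p
    simp only [List.flatMap_cons, List.map_append, List.sum_append, List.map_cons, List.sum_cons]
    omega

theorem weight_next_lt (p : List String) (F : List (List String)) :
    (((p :: F).flatMap nextLevelB).map weightB).sum < ((p :: F).map weightB).sum := by
  have h1 := weightB_succ p
  have h2 := weight_next_le F
  simp only [List.flatMap_cons, List.map_append, List.sum_append, List.map_cons, List.sum_cons]
  omega

def bfsLoopB (goalNode : String) (frontier : List (List String)) : List String :=
  if hne : frontier = [] then []
  else
    match frontier.find? (fun p => p.getLastD "" == goalNode) with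
    | some p => p
    | none => bfsLoopB goalNode (frontier.flatMap nextLevelB)
termination_by (frontier.map weightB).sum
decreasing_by
  simp only [List.flatMap_subtype, List.unattach_attach]
  obtain ⟨p, F, rfl⟩ : ∃ p F, frontier = p :: F := by
    cases frontier with
    | nil => exact absurd rfl hne
    | cons a b => exact ⟨a, b, rfl⟩
  exact weight_next_lt p F

def DFS_FewestNodesPath_alt (node : String) (goalNode : String) (path : List String) : List String :=
  bfsLoopB goalNode [path ++ [node]]

-- ===== PRECONDITION & SPEC =====
-- Pre_ excludes exactly the inputs where Python raises KeyError (both A and B): node neither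
-- the goal nor a key of the hard-coded graph (allNodesA is the graph's key list).
def Pre_DFS_FewestNodesPath (node : String) (goalNode : String) (path : List String) : Prop :=
  node = goalNode ∨ node ∈ allNodesA
instance (node : String) (goalNode : String) (path : List String) : Decidable (Pre_DFS_FewestNodesPath node goalNode path) := by unfold Pre_DFS_FewestNodesPath; infer_instance

def pvWitness_DFS_FewestNodesPath : String × String × List String := ("A", "N", [])

def Spec_DFS_FewestNodesPath (node : String) (goalNode : String) (path : List String) (out : List String) : Prop := out = DFS_FewestNodesPath_alt node goalNode path
instance (node : String) (goalNode : String) (path : List String) (out : List String) : Decidable (Spec_DFS_FewestNodesPath node goalNode path out) := by unfold Spec_DFS_FewestNodesPath; infer_instance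

-- ===== CLAIM (what is proved, stated in full; the proofs are below) =====
def Claim_equal_DFS_FewestNodesPath : Prop := ∀ (node : String) (goalNode : String) (path : List String), Dom_DFS_FewestNodesPath node goalNode path → Pre_DFS_FewestNodesPath node goalNode path → Spec_DFS_FewestNodesPath node goalNode path (DFS_FewestNodesPath node goalNode path)

-- ===== LEMMAS AND PROOFS =====

-- A's neighbour names, and the bridge to B's successor function
def nbrsA (k : String) : List String := ((PySem.Dict.get? graphA k).getD []).map Prod.fst

theorem childNamesB_eq (k : String) : childNamesB k = nbrsA k := by
  unfold childNamesB
  split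
  all_goals first
    | decide
    | (rename_i h1 h2 h3 h4 h5 h6 h7 h8 h9 h10 h11 h12 h13 h14 h15 h16 h17 h18 h19 h20
       simp only [nbrsA, graphA, PySem.Dict.get?_mk_cons, beq_iff_eq]
       rw [if_neg (fun h => h1 h.symm), if_neg (fun h => h2 h.symm), if_neg (fun h => h3 h.symm), if_neg (fun h => h4 h.symm), if_neg (fun h => h5 h.symm), if_neg (fun h => h6 h.symm), if_neg (fun h => h7 h.symm), if_neg (fun h => h8 h.symm), if_neg (fun h => h9 h.symm), if_neg (fun h => h10 h.symm), if_neg (fun h => h11 h.symm), if_neg (fun h => h12 h.symm), if_neg (fun h => h13 h.symm), if_neg (fun h => h14 h.symm), if_neg (fun h => h15 h.symm), if_neg (fun h => h16 h.symm), if_neg (fun h => h17 h.symm), if_neg (fun h => h18 h.symm), if_neg (fun h => h19 h.symm), if_neg (fun h => h20 h.symm)]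
       rfl)

theorem pool_sub (c : String) (h : c ∈ vertexPoolB) : c ∈ allNodesA := by
  fin_cases h <;> decide

-- proof layer: A's fold as an associative selection
def combineP (best np : List String) : List String :=
  if np ≠ [] ∧ (np.length < best.length ∨ best = []) then np else best

def selP (l : List (List String)) : List String := l.foldl combineP []

def dfsResA (goalNode : String) (q : List String) : List String :=
  DFS_FewestNodesPath (q.getLastD "") goalNode q.dropLast

theorem combineP_nil_left (b : List String) : combineP [] b = b := by
  unfold combineP; split_ifs with h <;> simp_all

theorem combineP_nil_right (b : List String) : combineP b [] = b := by simp [combineP]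

theorem combineP_cases (a b : List String) : combineP a b = a ∨ combineP a b = b := by
  unfold combineP; split_ifs <;> simp

theorem combineP_ne_nil (a b : List String) (ha : a ≠ []) (hb : b ≠ []) :
    combineP a b = if b.length < a.length then b else a := by
  simp [combineP, hb, ha]

theorem combineP_assoc (a b c : List String) :
    combineP (combineP a b) c = combineP a (combineP b c) := by
  rcases eq_or_ne a [] with rfl | ha
  · rw [combineP_nil_left, combineP_nil_left]
  rcases eq_or_ne b [] with rfl | hb
  · rw [combineP_nil_right, combineP_nil_left]
  rcases eq_or_ne c [] with rfl | hc
  · rw [combineP_nil_right, combineP_nil_right]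
  rw [combineP_ne_nil a b ha hb, combineP_ne_nil b c hb hc]
  split_ifs with h1 h2
  all_goals simp only [combineP_ne_nil a b ha hb, combineP_ne_nil b c hb hc,
    combineP_ne_nil a c ha hc]
  all_goals split_ifs <;> first | rfl | omega

theorem foldl_combineP (l : List (List String)) (a : List String) :
    l.foldl combineP a = combineP a (selP l) := by
  induction l generalizing a with
  | nil => simp [selP, combineP_nil_right]
  | cons x xs ih =>
    have hsel : selP (x :: xs) = combineP x (selP xs) := by
      show List.foldl combineP (combineP [] x) xs = _
      rw [combineP_nil_left, ih]
    rw [List.foldl_cons, ih, hsel, combineP_assoc]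

theorem selP_cons (x : List String) (xs : List (List String)) :
    selP (x :: xs) = combineP x (selP xs) := by
  rw [selP]
  simp only [List.foldl_cons]
  rw [combineP_nil_left, foldl_combineP]

theorem selP_append (xs ys : List (List String)) :
    selP (xs ++ ys) = combineP (selP xs) (selP ys) := by
  rw [selP, List.foldl_append, foldl_combineP]
  rfl

theorem selP_flatMap (l : List (List String)) (f : List String → List (List String)) :
    selP (l.flatMap f) = selP (l.map fun x => selP (f x)) := by
  induction l with
  | nil => rfl
  | cons x xs ih =>
    rw [List.flatMap_cons, selP_append, List.map_cons, selP_cons, ih]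

theorem selP_mem (l : List (List String)) : selP l = [] ∨ selP l ∈ l := by
  induction l with
  | nil => left; rfl
  | cons x xs ih =>
    rw [selP_cons]
    rcases combineP_cases x (selP xs) with h | h
    · right; rw [h]; exact List.mem_cons_self
    · rw [h]
      rcases ih with h' | h'
      · left; exact h'
      · right; exact List.mem_cons_of_mem _ h'

theorem dfs_goal (node goalNode : String) (path : List String) (h : node = goalNode) :
    DFS_FewestNodesPath node goalNode path = path ++ [node] := by
  rw [DFS_FewestNodesPath]
  simp [h]

theorem dfs_bridge (node goalNode : String) (path : List String) :
    dfsResA goalNode (path ++ [node]) = DFS_FewestNodesPath node goalNode path := by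
  unfold dfsResA
  rw [List.getLastD_concat, List.dropLast_concat]

theorem foldl_if_filter (l : List String) (P : String → Prop) [DecidablePred P]
    (f : String → List String) (a : List String) :
    l.foldl (fun b x => if P x then combineP b (f x) else b) a
      = ((l.filter fun x => decide (P x)).map f).foldl combineP a := by
  induction l generalizing a with
  | nil => rfl
  | cons x xs ih =>
    simp only [List.foldl_cons, List.filter_cons]
    by_cases hx : P x
    · simp only [hx, if_true, decide_true, List.map_cons, List.foldl_cons]
      exact ih _
    · simp only [hx, if_false, decide_false]
      exact ih _

theorem dfs_unfold (goalNode : String) (q : List String) (hq : q ≠ [])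
    (hg : q.getLastD "" ≠ goalNode) :
    dfsResA goalNode q = selP ((nextLevelB q).map (dfsResA goalNode)) := by
  rcases List.eq_nil_or_concat q with rfl | ⟨ys, x, rfl⟩
  · exact absurd rfl hq
  rw [List.concat_eq_append] at *
  rw [List.getLastD_concat] at hg
  rw [dfs_bridge]
  rw [DFS_FewestNodesPath]
  simp only [if_neg hg]
  have hchild : nextLevelB (ys ++ [x])
      = ((childNamesB x).filter (fun c => decide (c ∉ ys ++ [x]))).map (fun c => (ys ++ [x]) ++ [c]) := by
    unfold nextLevelB
    rw [List.getLastD_concat]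
  cases hget : PySem.Dict.get? graphA x with
  | none =>
    rw [hchild, childNamesB_eq]
    simp [nbrsA, hget, selP]
  | some l =>
    show l.attach.foldl
        (fun best cd => if cd.1.1 ∉ ys ++ [x] then
          combineP best (DFS_FewestNodesPath cd.1.1 goalNode (ys ++ [x])) else best) [] = _
    rw [List.foldl_attach (f := fun b (y : String × Int) =>
      if y.1 ∉ ys ++ [x] then combineP b (DFS_FewestNodesPath y.1 goalNode (ys ++ [x])) else b)]
    rw [← List.foldl_map (f := Prod.fst)
      (g := fun b c => if c ∉ ys ++ [x] then combineP b (DFS_FewestNodesPath c goalNode (ys ++ [x])) else b)]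
    have hn : l.map Prod.fst = childNamesB x := by rw [childNamesB_eq]; simp [nbrsA, hget]
    rw [hn, foldl_if_filter]
    rw [hchild, List.map_map]
    show selP _ = selP _
    congr 1
    apply List.map_congr_left
    intro c _
    exact (dfs_bridge c goalNode (ys ++ [x])).symm

theorem dfs_len (goalNode : String) (n : Nat) : ∀ (q : List String), muA q ≤ n → q ≠ [] →
    dfsResA goalNode q = [] ∨ (q.length ≤ (dfsResA goalNode q).length ∧
      (q.getLastD "" ≠ goalNode → q.length < (dfsResA goalNode q).length)) := by
  induction n using Nat.strong_induction_on with
  | _ n ih =>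
    intro q hmu hq
    by_cases hgl : q.getLastD "" = goalNode
    · have hval : dfsResA goalNode q = q := by
        rcases List.eq_nil_or_concat q with rfl | ⟨ys, x, rfl⟩
        · exact absurd rfl hq
        rw [List.concat_eq_append] at *
        rw [List.getLastD_concat] at hgl
        rw [dfs_bridge, dfs_goal _ _ _ hgl]
      right
      rw [hval]
      exact ⟨le_rfl, fun h => absurd hgl h⟩
    · rw [dfs_unfold goalNode q hq hgl]
      rcases selP_mem ((nextLevelB q).map (dfsResA goalNode)) with h | h
      · left; exact h
      · rw [List.mem_map] at h
        obtain ⟨r, hr, hval⟩ := h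
        unfold nextLevelB at hr
        rw [List.mem_map] at hr
        obtain ⟨c, hcf, rfl⟩ := hr
        rw [List.mem_filter] at hcf
        have hc1 : c ∈ allNodesA := pool_sub c (childNamesB_pool _ _ hcf.1)
        have hc2 : c ∉ q := by simpa using hcf.2
        have hmu2 : muA (q ++ [c]) < muA q := muA_lt q c hc1 hc2
        have hlen : (q ++ [c]).length = q.length + 1 := by simp
        rcases ih (muA (q ++ [c])) (by omega) (q ++ [c]) le_rfl (by simp) with h0 | ⟨hle, _⟩
        · left; rw [← hval, h0]
        · right
          rw [← hval]
          constructor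
          · omega
          · intro _; omega

theorem sel_goal (goalNode : String) (L : Nat) : ∀ (F : List (List String)),
    (∀ r ∈ F, r ≠ []) → (∀ r ∈ F, r.length = L) →
    ∀ p, F.find? (fun r => r.getLastD "" == goalNode) = some p →
    selP (F.map (dfsResA goalNode)) = p := by
  intro F
  induction F with
  | nil => intro _ _ p hf; simp at hf
  | cons r F ih =>
    intro hne hL p hf
    rw [List.find?_cons] at hf
    by_cases hr : (r.getLastD "" == goalNode) = true
    · rw [hr] at hf
      cases hf
      have hgl : r.getLastD "" = goalNode := by simpa using hr
      have hval : dfsResA goalNode r = r := by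
        rcases List.eq_nil_or_concat r with hrnil | ⟨ys, x, hrc⟩
        · exact absurd hrnil (hne r List.mem_cons_self)
        rw [List.concat_eq_append] at hrc
        rw [hrc] at hgl ⊢
        rw [List.getLastD_concat] at hgl
        rw [dfs_bridge, dfs_goal _ _ _ hgl]
      rw [List.map_cons, selP_cons, hval]
      have hp : r ≠ [] := hne r List.mem_cons_self
      have hpL : r.length = L := hL r List.mem_cons_self
      rcases selP_mem (F.map (dfsResA goalNode)) with hx | hx
      · rw [hx, combineP_nil_right]
      · rw [List.mem_map] at hx
        obtain ⟨r', hr', hval'⟩ := hx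
        rcases dfs_len goalNode (muA r') r' le_rfl
            (hne r' (List.mem_cons_of_mem _ hr')) with h0 | ⟨hle, _⟩
        · rw [hval'] at h0
          rw [h0, combineP_nil_right]
        · rw [hval'] at hle
          have hr'L : r'.length = L := hL r' (List.mem_cons_of_mem _ hr')
          rcases eq_or_ne (selP (F.map (dfsResA goalNode))) [] with he | he
          · rw [he, combineP_nil_right]
          · rw [combineP_ne_nil r _ hp he]
            rw [if_neg (by omega)]
    · rw [Bool.not_eq_true] at hr
      rw [hr] at hf
      have hpF := List.mem_of_find?_eq_some hf
      have := ih (fun x hx => hne x (List.mem_cons_of_mem _ hx))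
        (fun x hx => hL x (List.mem_cons_of_mem _ hx)) p hf
      rw [List.map_cons, selP_cons, this]
      have hp : p ≠ [] := hne p (List.mem_cons_of_mem _ hpF)
      have hpL : p.length = L := hL p (List.mem_cons_of_mem _ hpF)
      have hrne : r.getLastD "" ≠ goalNode := by simpa using hr
      rcases dfs_len goalNode (muA r) r le_rfl (hne r List.mem_cons_self) with h0 | ⟨_, hstrict⟩
      · rw [h0, combineP_nil_left]
      · have hrL : r.length = L := hL r List.mem_cons_self
        have := hstrict hrne
        rcases eq_or_ne (dfsResA goalNode r) [] with he | he
        · rw [he, combineP_nil_left]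
        · rw [combineP_ne_nil _ p he hp]
          rw [if_pos (by omega)]

theorem selP_singleton (x : List String) : selP [x] = x := by
  rw [selP_cons]
  exact combineP_nil_right x

theorem bfs_eq (goalNode : String) (n : Nat) : ∀ (F : List (List String)) (L : Nat),
    (F.map weightB).sum ≤ n → (∀ r ∈ F, r ≠ []) → (∀ r ∈ F, r.length = L) →
    bfsLoopB goalNode F = selP (F.map (dfsResA goalNode)) := by
  induction n using Nat.strong_induction_on with
  | _ n ih =>
    intro F L hsum hne hL
    by_cases hF : F = []
    · rw [bfsLoopB]
      simp [hF, selP]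
    · rw [bfsLoopB, dif_neg hF]
      cases hfind : F.find? (fun p => p.getLastD "" == goalNode) with
      | some p => exact (sel_goal goalNode L F hne hL p hfind).symm
      | none =>
        dsimp only
        have hsum2 : ((F.flatMap nextLevelB).map weightB).sum < (F.map weightB).sum := by
          cases F with
          | nil => exact absurd rfl hF
          | cons p F' => exact weight_next_lt p F'
        have hNE : ∀ r ∈ F.flatMap nextLevelB, r ≠ [] := by
          intro r hr
          rw [List.mem_flatMap] at hr
          obtain ⟨q, _, hrq⟩ := hr
          unfold nextLevelB at hrq
          rw [List.mem_map] at hrq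
          obtain ⟨c, _, rfl⟩ := hrq
          simp
        have hLL : ∀ r ∈ F.flatMap nextLevelB, r.length = L + 1 := by
          intro r hr
          rw [List.mem_flatMap] at hr
          obtain ⟨q, hq, hrq⟩ := hr
          unfold nextLevelB at hrq
          rw [List.mem_map] at hrq
          obtain ⟨c, _, rfl⟩ := hrq
          simp [hL q hq]
        rw [ih (((F.flatMap nextLevelB).map weightB).sum) (by omega) (F.flatMap nextLevelB) (L + 1)
          le_rfl hNE hLL]
        rw [List.map_flatMap, selP_flatMap]
        congr 1
        apply List.map_congr_left
        intro q hq
        have hqgl : q.getLastD "" ≠ goalNode := by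
          have := List.find?_eq_none.mp hfind q hq
          simpa using this
        exact (dfs_unfold goalNode q (hne q hq) hqgl).symm

theorem dfs_eq_alt (node goalNode : String) (path : List String) :
    DFS_FewestNodesPath node goalNode path = DFS_FewestNodesPath_alt node goalNode path := by
  unfold DFS_FewestNodesPath_alt
  rw [bfs_eq goalNode (([path ++ [node]].map weightB).sum) [path ++ [node]] (path ++ [node]).length
    le_rfl (by simp) (by simp)]
  rw [List.map_cons, List.map_nil, selP_singleton, dfs_bridge]

-- ===== VERDICT (by name: the statement is the Claim_ definition above) =====
theorem DFS_FewestNodesPath_spec : Claim_equal_DFS_FewestNodesPath := by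
  intro node goalNode path _ _
  exact dfs_eq_alt node goalNode path
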